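-- pv_equiv track=rewrite | github.com/Mentor64355/IFT3335 | IFT3335_TP1/hill_climbing.py | evaluate
-- ===== SOURCE A (Python) =====
-- def evaluate(lines):
--
--     conflicts = 0
--     for line in lines :
--         conflicts += (len(line) - len(set(line))) # compte les conflits dans chaque ligne
--
--     cols = zip(*lines) # switch les lignes et les colonnes
--     for col in cols :
--         conflicts += (len(col) - len(set(col))) # compte les conflits dans les colonnes
--
--     return conflicts
-- ===== SOURCE B (Python) =====
-- def evaluate(lines):
--     # One streaming pass: per-row duplicate count and per-column duplicate
--     # count (columns truncated to the shortest row, as zip(*lines) does)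
--     # are accumulated together, without building the transpose.
--     conflicts = 0
--     m = min((len(l) for l in lines), default=0)
--     col_seen = [set() for _ in range(m)]
--     for line in lines:
--         row_seen = set()
--         for j, v in enumerate(line):
--             if v in row_seen:
--                 conflicts += 1
--             else:
--                 row_seen.add(v)
--             if j < m:
--                 s = col_seen[j]
--                 if v in s:
--                     conflicts += 1
--                 else:
--                     s.add(v)
--     return conflicts
-- ===== Notes on version B (the rewrite author's own statement) =====
-- stated objective: alternative
-- what changed: Single streaming pass over the rows that counts row and column duplicates simultaneously via per-column seen-sets, instead of a row pass plus a transpose (zip(*lines)) pass.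
import Mathlib
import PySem

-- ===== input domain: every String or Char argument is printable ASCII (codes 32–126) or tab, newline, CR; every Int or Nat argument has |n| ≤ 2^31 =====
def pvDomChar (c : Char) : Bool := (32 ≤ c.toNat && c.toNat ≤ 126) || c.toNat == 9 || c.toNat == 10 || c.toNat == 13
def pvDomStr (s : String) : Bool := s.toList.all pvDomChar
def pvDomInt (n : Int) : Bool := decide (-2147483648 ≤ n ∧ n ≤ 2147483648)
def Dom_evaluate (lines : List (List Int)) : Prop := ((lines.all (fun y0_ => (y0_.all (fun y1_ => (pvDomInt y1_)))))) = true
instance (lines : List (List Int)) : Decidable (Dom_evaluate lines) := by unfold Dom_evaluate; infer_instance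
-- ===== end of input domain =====

-- B replaces A's two passes (rows, then a zip(*lines) transpose) by one streaming
-- pass with per-column seen-sets; same result, no transpose built (objective: alternative).


-- ===== PORT A =====
-- shared trivial helper: the length of the shortest row (0 for no rows);
-- this is the number of columns zip(*lines) yields
def minLen : List (List Int) → Nat
  | [] => 0
  | l :: ls => ls.foldl (fun m r => min m r.length) l.length

def evaluate (lines : List (List Int)) : Int :=
  -- first loop: conflicts += len(line) - len(set(line))
  let conflicts :=
    lines.foldl (fun c line =>
      c + ((line.length : Int) - ((PySem.Set.ofList line).length : Int))) 0
  -- zip(*lines) ported by hand, exact: columns 0..min row length; every index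
  -- j < minLen lines is in range for every row, so getD never uses its default
  let cols := (List.range (minLen lines)).map (fun j => lines.map (fun l => l.getD j 0))
  cols.foldl (fun c col =>
    c + ((col.length : Int) - ((PySem.Set.ofList col).length : Int))) conflicts

-- ===== PORT B =====
-- inner loop of Source B: one row, lockstep with the per-column seen-sets
-- (enumerate + `j < m` + col_seen[j] is exactly a lockstep traversal of
-- the row and col_seen, since len(col_seen) = m)
def stepRow : List Int → PySem.Set Int → List (PySem.Set Int) → Int → Int × List (PySem.Set Int)
  | [], _, cs, c => (c, cs)
  | v :: vs, rs, [], c =>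
      let p := if PySem.Set.contains rs v then (c + 1, rs) else (c, PySem.Set.add rs v)
      stepRow vs p.2 [] p.1
  | v :: vs, rs, s :: cs, c =>
      let p := if PySem.Set.contains rs v then (c + 1, rs) else (c, PySem.Set.add rs v)
      let q := if PySem.Set.contains s v then (p.1 + 1, s) else (p.1, PySem.Set.add s v)
      let r := stepRow vs p.2 cs q.1
      (r.1, q.2 :: r.2)

def evaluate_alt (lines : List (List Int)) : Int :=
  let colSeen := List.replicate (minLen lines) (PySem.Set.empty : PySem.Set Int)
  (lines.foldl (fun (p : Int × List (PySem.Set Int)) line =>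
      stepRow line PySem.Set.empty p.2 p.1) ((0 : Int), colSeen)).1

-- ===== PRECONDITION & SPEC =====
def Spec_evaluate (lines : List (List Int)) (out : Int) : Prop := out = evaluate_alt lines
instance (lines : List (List Int)) (out : Int) : Decidable (Spec_evaluate lines out) := by unfold Spec_evaluate; infer_instance

-- ===== CLAIM (what is proved, stated in full; the proofs are below) =====
def Claim_equal_evaluate : Prop := ∀ (lines : List (List Int)), Dom_evaluate lines → Spec_evaluate lines (evaluate lines)

-- ===== LEMMAS AND PROOFS =====

-- streaming duplicate count of a list against an initial seen-set
def sDup : List Int → PySem.Set Int → Int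
  | [], _ => 0
  | v :: vs, s => (if PySem.Set.contains s v then 1 else 0) + sDup vs (PySem.Set.add s v)

-- column-part increment / update of one row against the column seen-sets (lockstep)
def colInc : List Int → List (PySem.Set Int) → Int
  | [], _ => 0
  | _, [] => 0
  | v :: vs, s :: cs => (if PySem.Set.contains s v then 1 else 0) + colInc vs cs

def colUpd : List Int → List (PySem.Set Int) → List (PySem.Set Int)
  | [], cs => cs
  | _ :: _, [] => []
  | v :: vs, s :: cs => PySem.Set.add s v :: colUpd vs cs

-- total column-part contribution of all rows
def colC : List (List Int) → List (PySem.Set Int) → Int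
  | [], _ => 0
  | l :: L, cs => colInc l cs + colC L (colUpd l cs)

theorem setAdd_mem (s : PySem.Set Int) (v : Int) (h : v ∈ s) :
    PySem.Set.add s v = s := by
  simp [PySem.Set.add, h]

theorem setAdd_not_mem (s : PySem.Set Int) (v : Int) (h : ¬ v ∈ s) :
    PySem.Set.add s v = s ++ [v] := by
  simp [PySem.Set.add, h]

theorem sDup_foldl (vs : List Int) : ∀ s : PySem.Set Int,
    sDup vs s + ((vs.foldl PySem.Set.add s).length : Int) = (vs.length : Int) + (s.length : Int) := by
  induction vs with
  | nil => intro s; simp [sDup]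
  | cons v vs ih =>
    intro s
    simp only [sDup, List.foldl_cons, List.length_cons]
    by_cases h : v ∈ s
    · rw [setAdd_mem s v h]
      have := ih s
      simp [h]
      omega
    · rw [setAdd_not_mem s v h]
      have := ih (s ++ [v])
      simp [h] at this ⊢
      omega

theorem sDup_empty (vs : List Int) :
    sDup vs PySem.Set.empty = (vs.length : Int) - ((PySem.Set.ofList vs).length : Int) := by
  have h := sDup_foldl vs PySem.Set.empty
  have hof : PySem.Set.ofList vs = vs.foldl PySem.Set.add PySem.Set.empty := rfl
  rw [hof]
  simp [PySem.Set.empty] at h ⊢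
  omega

theorem colInc_nil_cs (vs : List Int) : colInc vs [] = 0 := by cases vs <;> rfl

theorem colUpd_nil_cs (vs : List Int) : colUpd vs [] = [] := by cases vs <;> rfl

theorem stepRow_spec (vs : List Int) : ∀ (rs : PySem.Set Int) (cs : List (PySem.Set Int)) (c : Int),
    stepRow vs rs cs c = (c + sDup vs rs + colInc vs cs, colUpd vs cs) := by
  induction vs with
  | nil => intro rs cs c; cases cs <;> simp [stepRow, sDup, colInc, colUpd]
  | cons v vs ih =>
    intro rs cs c
    cases cs with
    | nil =>
      simp only [stepRow, ih, sDup, colInc_nil_cs, colUpd_nil_cs]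
      by_cases h : v ∈ rs
      · rw [setAdd_mem rs v h]
        simp [h]
        omega
      · simp [h]
    | cons s cs =>
      simp only [stepRow, ih, sDup, colInc, colUpd, Prod.mk.injEq]
      by_cases h : v ∈ rs <;> by_cases h2 : v ∈ s
      · rw [setAdd_mem rs v h, setAdd_mem s v h2]; simp [h, h2]; try omega
      · rw [setAdd_mem rs v h]; simp [h, h2]; try omega
      · rw [setAdd_mem s v h2]; simp [h, h2]; try omega
      · simp [h, h2]; try omega

theorem colC_nil_cols (L : List (List Int)) : colC L [] = 0 := by
  induction L with
  | nil => rfl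
  | cons l L ih =>
    cases l <;> simp [colC, colInc, colUpd, ih]

theorem colSplit (L : List (List Int)) : ∀ (s : PySem.Set Int) (cs : List (PySem.Set Int)),
    (∀ l ∈ L, l ≠ []) →
    colC L (s :: cs) = sDup (L.map (fun l => l.getD 0 0)) s + colC (L.map List.tail) cs := by
  induction L with
  | nil => intro s cs _; simp only [List.map_nil, colC, sDup]; omega
  | cons l L ih =>
    intro s cs hne
    obtain ⟨v, t, rfl⟩ : ∃ v t, l = v :: t := by
      cases l with
      | nil => exact absurd rfl (hne _ (List.mem_cons_self))
      | cons v t => exact ⟨v, t, rfl⟩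
    have hL : ∀ l ∈ L, l ≠ [] := fun l hl => hne l (List.mem_cons_of_mem _ hl)
    simp only [colC, colInc, colUpd, List.map_cons, sDup, List.tail_cons, List.getD_cons_zero]
    rw [ih (PySem.Set.add s v) (colUpd t cs) hL]
    omega

theorem getD_tail (l : List Int) (j : Nat) : l.tail.getD j 0 = l.getD (j + 1) 0 := by
  cases l <;> simp

theorem colC_replicate (m : Nat) : ∀ (L : List (List Int)),
    (∀ l ∈ L, m ≤ l.length) →
    colC L (List.replicate m PySem.Set.empty)
      = ((List.range m).map (fun j =>
          ((L.length : Int) - ((PySem.Set.ofList (L.map (fun l => l.getD j 0))).length : Int)))).sum := by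
  induction m with
  | zero => intro L _; simp [colC_nil_cols]
  | succ m ih =>
    intro L hlen
    have hne : ∀ l ∈ L, l ≠ [] := by
      intro l hl h
      have := hlen l hl
      simp [h] at this
    rw [List.replicate_succ, colSplit L _ _ hne]
    have hlen' : ∀ l ∈ L.map List.tail, m ≤ l.length := by
      intro l hl
      obtain ⟨l', hl', rfl⟩ := List.mem_map.mp hl
      have := hlen l' hl'
      simp [List.length_tail]
      omega
    rw [ih (L.map List.tail) hlen']
    rw [List.range_succ_eq_map]
    simp only [List.map_cons, List.sum_cons, List.map_map, List.length_map]
    rw [sDup_empty]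
    congr 1
    · simp
    · apply congrArg List.sum
      apply List.map_congr_left
      intro j _
      simp only [Function.comp, List.length_map]
      congr 2
      congr 2
      apply List.map_congr_left
      intro l _
      simp [getD_tail]

theorem foldl_add_term (f : List Int → Int) (l : List (List Int)) : ∀ (c : Int),
    l.foldl (fun c x => c + f x) c = c + (l.map f).sum := by
  induction l with
  | nil => intro c; simp
  | cons x l ih => intro c; simp [ih]; ring

theorem alt_fold (L : List (List Int)) : ∀ (c : Int) (cs : List (PySem.Set Int)),
    (L.foldl (fun (p : Int × List (PySem.Set Int)) line =>
        stepRow line PySem.Set.empty p.2 p.1) (c, cs)).1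
      = c + (L.map (fun l => sDup l PySem.Set.empty)).sum + colC L cs := by
  induction L with
  | nil => intro c cs; simp [colC]
  | cons l L ih =>
    intro c cs
    rw [List.foldl_cons, stepRow_spec]
    rw [ih]
    simp only [List.map_cons, List.sum_cons, colC]
    ring

theorem minLen_le (ls : List (List Int)) : ∀ (n : Nat),
    ls.foldl (fun m r => min m r.length) n ≤ n ∧
    ∀ l ∈ ls, ls.foldl (fun m r => min m r.length) n ≤ l.length := by
  induction ls with
  | nil => intro n; simp
  | cons r ls ih =>
    intro n
    have h := ih (min n r.length)
    refine ⟨le_trans h.1 (by omega), ?_⟩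
    intro l hl
    rcases List.mem_cons.mp hl with rfl | hl
    · exact le_trans h.1 (by omega)
    · exact h.2 l hl

theorem minLen_le_rows (lines : List (List Int)) :
    ∀ l ∈ lines, minLen lines ≤ l.length := by
  cases lines with
  | nil => simp
  | cons l ls =>
    intro r hr
    have h := minLen_le ls l.length
    rcases List.mem_cons.mp hr with rfl | hr
    · exact h.1
    · exact h.2 r hr

-- ===== VERDICT (by name: the statement is the Claim_ definition above) =====
theorem evaluate_spec : Claim_equal_evaluate := by
  intro lines _
  unfold Spec_evaluate evaluate evaluate_alt
  rw [alt_fold lines 0 (List.replicate (minLen lines) PySem.Set.empty),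
      colC_replicate (minLen lines) lines (minLen_le_rows lines),
      foldl_add_term, foldl_add_term, List.map_map]
  simp only [zero_add]
  congr 1
  · apply congrArg List.sum
    apply List.map_congr_left
    intro l _
    rw [sDup_empty]
  · apply congrArg List.sum
    apply List.map_congr_left
    intro j _
    simp [Function.comp]
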